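-- pv_equiv track=rewrite | github.com/josiahseaman/skittle | SkittleCore/Graphs/SkittleGraphTransforms.py | generateExhaustiveOligomerList
-- ===== SOURCE A (Python) =====
-- def generateExhaustiveOligomerList(oligomerSize, startingSet=[]):
--     letters = ['A', 'C', 'G', 'T']
--     if not startingSet:
--         startingSet = letters
--     if len(startingSet[0]) < oligomerSize:
--         newSet = []
--         for olig in startingSet:
--             for n in letters: #a new olig gets added four times for each element in the list
--                 newSet.append(olig + n)
--         return generateExhaustiveOligomerList(oligomerSize, newSet)
--     else:
--         return startingSet
-- ===== SOURCE B (Python) =====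
-- def generateExhaustiveOligomerList(oligomerSize, startingSet=[]):
--     letters = ['A', 'C', 'G', 'T']
--     if not startingSet:
--         startingSet = letters
--     remaining = max(oligomerSize - len(startingSet[0]), 0)
--     suffixes = ['']
--     for _ in range(remaining):
--         suffixes = [c + s for c in letters for s in suffixes]
--     return [olig + s for olig in startingSet for s in suffixes]
-- ===== Notes on version B (the rewrite author's own statement) =====
-- stated objective: simpler
-- what changed: A rebuilds the whole growing set once per recursion level (appending one letter to every string each round); B computes remaining = max(oligomerSize - len(startingSet[0]), 0) once, builds the list of all length-remaining ACGT suffixes, and emits olig + suffix for each starting oligomer in one flat pass, with no recursion on the set.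
import Mathlib
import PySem

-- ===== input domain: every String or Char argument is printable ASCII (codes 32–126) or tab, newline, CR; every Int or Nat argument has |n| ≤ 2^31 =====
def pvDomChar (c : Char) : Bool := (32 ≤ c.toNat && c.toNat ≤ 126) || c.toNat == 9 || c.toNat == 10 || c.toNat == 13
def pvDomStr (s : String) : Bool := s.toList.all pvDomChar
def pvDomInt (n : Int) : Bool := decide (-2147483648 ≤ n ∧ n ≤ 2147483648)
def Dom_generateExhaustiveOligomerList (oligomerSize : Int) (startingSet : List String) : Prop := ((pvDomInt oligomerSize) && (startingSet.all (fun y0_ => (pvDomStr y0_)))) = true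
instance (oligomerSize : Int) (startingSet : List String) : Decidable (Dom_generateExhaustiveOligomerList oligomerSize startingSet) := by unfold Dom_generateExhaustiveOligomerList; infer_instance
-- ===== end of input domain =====

-- B replaces A's repeated whole-set rebuilding recursion by precomputing the list of
-- length-`remaining` suffixes once and appending each to each starting oligomer in a
-- single flat pass (objective: simpler).

-- ===== PORT A =====
def generateExhaustiveOligomerList (oligomerSize : Int) (startingSet : List String) : List String :=
  let letters := ["A", "C", "G", "T"]
  let ss := if startingSet = [] then letters else startingSet
  if ((ss.headD "").length : Int) < oligomerSize then
    let newSet := ss.foldl (fun acc olig => letters.foldl (fun a n => a ++ [olig ++ n]) acc) []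
    generateExhaustiveOligomerList oligomerSize newSet
  else
    ss
termination_by (oligomerSize - (((if startingSet = [] then ["A", "C", "G", "T"] else startingSet).headD "").length : Int)).toNat
decreasing_by
  rename_i hlt
  simp only [letters, ss] at *
  by_cases hb : startingSet = []
  · simp only [hb] at hlt ⊢
    simp at hlt ⊢
    have h1 : ("A" : String).length = 1 := by decide
    have h2 : ("AA" : String).length = 2 := by decide
    rw [h1] at hlt
    rw [h1, h2]
    omega
  · cases startingSet with
    | nil => exact absurd rfl hb
    | cons h t =>
      simp [hb] at hlt ⊢
      have h1 : ("A" : String).length = 1 := by decide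
      rw [h1]
      omega

-- ===== PORT B =====
def generateExhaustiveOligomerList_alt (oligomerSize : Int) (startingSet : List String) : List String :=
  let letters := ["A", "C", "G", "T"]
  let ss := if startingSet = [] then letters else startingSet
  let remaining := (oligomerSize - ((ss.headD "").length : Int)).toNat
  let suffixes := (List.range remaining).foldl
    (fun sfx _ => letters.flatMap (fun c => sfx.map (fun s => c ++ s))) [""]
  ss.flatMap (fun olig => suffixes.map (fun s => olig ++ s))

-- ===== PRECONDITION & SPEC =====
def Spec_generateExhaustiveOligomerList (oligomerSize : Int) (startingSet : List String) (out : List String) : Prop := out = generateExhaustiveOligomerList_alt oligomerSize startingSet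
instance (oligomerSize : Int) (startingSet : List String) (out : List String) : Decidable (Spec_generateExhaustiveOligomerList oligomerSize startingSet out) := by unfold Spec_generateExhaustiveOligomerList; infer_instance

-- ===== CLAIM (what is proved, stated in full; the proofs are below) =====
def Claim_equal_generateExhaustiveOligomerList : Prop := ∀ (oligomerSize : Int) (startingSet : List String), Dom_generateExhaustiveOligomerList oligomerSize startingSet → Spec_generateExhaustiveOligomerList oligomerSize startingSet (generateExhaustiveOligomerList oligomerSize startingSet)

-- ===== LEMMAS AND PROOFS =====
-- One recursion step of A rewrites the whole set.
theorem pvStepA (h : String) (t : List String) :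
    (h :: t).foldl
      (fun acc olig => ["A", "C", "G", "T"].foldl (fun a n => a ++ [olig ++ n]) acc) [] =
    (h :: t).flatMap (fun olig => ["A", "C", "G", "T"].map (fun n => olig ++ n)) := by
  calc (h :: t).foldl
        (fun acc olig => ["A", "C", "G", "T"].foldl (fun a n => a ++ [olig ++ n]) acc) [] =
      (h :: t).foldl
        (fun acc olig => acc ++ ["A", "C", "G", "T"].map (fun n => olig ++ n)) [] := by
        apply PySem.List.foldl_congr_mem
        intro acc olig _
        exact PySem.List.foldl_append_singleton_eq_map (fun n => olig ++ n) _ acc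
    _ = _ := PySem.List.foldl_append_eq_flatMap (fun olig => ["A", "C", "G", "T"].map (fun n => olig ++ n)) _ []

theorem pvStepA_head (h : String) (t : List String) :
    (h :: t).flatMap (fun olig => ["A", "C", "G", "T"].map (fun n => olig ++ n)) =
    (h ++ "A") :: (["C", "G", "T"].map (fun n => h ++ n) ++
      t.flatMap (fun olig => ["A", "C", "G", "T"].map (fun n => olig ++ n))) := by
  simp [List.flatMap_cons]

-- The mathematical form of B's suffix list: all strings of length k over A,C,G,T,
-- first letter varying slowest.
def pvCombos : Nat → List String
  | 0 => [""]
  | k + 1 => ["A", "C", "G", "T"].flatMap (fun c => (pvCombos k).map (fun s => c ++ s))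

theorem pvSuffixes_eq (k : Nat) :
    (List.range k).foldl
      (fun sfx _ => ["A", "C", "G", "T"].flatMap (fun c => sfx.map (fun s => c ++ s))) [""] =
    pvCombos k := by
  induction k with
  | zero => simp [pvCombos]
  | succ k ih =>
    rw [List.range_succ, List.foldl_append, ih]
    simp [pvCombos]

theorem pvCombos_shift (k : Nat) (xs : List String) :
    (xs.flatMap (fun olig => ["A", "C", "G", "T"].map (fun n => olig ++ n))).flatMap
        (fun olig => (pvCombos k).map (fun s => olig ++ s)) =
    xs.flatMap (fun olig => (pvCombos (k + 1)).map (fun s => olig ++ s)) := by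
  rw [List.flatMap_assoc]
  congr 1
  funext olig
  rw [List.flatMap_map]
  show (["A", "C", "G", "T"].flatMap fun c => (pvCombos k).map (fun s => (olig ++ c) ++ s)) = _
  simp only [pvCombos, List.map_flatMap, List.map_map]
  congr 1
  funext c
  congr 1
  funext s
  simp [String.append_assoc]

-- A's recursion computes exactly "each element of the set followed by every length-k
-- suffix", where k = max(oligomerSize - len(head), 0).
theorem pvGenA_eq (k : Nat) : ∀ (n : Int) (h : String) (t : List String),
    (n - ((h.length : Nat) : Int)).toNat = k →
    generateExhaustiveOligomerList n (h :: t) =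
      (h :: t).flatMap (fun olig => (pvCombos k).map (fun s => olig ++ s)) := by
  induction k with
  | zero =>
    intro n h t hk
    rw [generateExhaustiveOligomerList]
    simp only [if_neg (by simp : ¬(h :: t = ([] : List String))), List.headD_cons]
    rw [if_neg (by omega : ¬ (((h.length : Nat) : Int) < n))]
    simp [pvCombos]
  | succ k ih =>
    intro n h t hk
    rw [generateExhaustiveOligomerList]
    simp only [if_neg (by simp : ¬(h :: t = ([] : List String))), List.headD_cons]
    rw [if_pos (by omega : ((h.length : Nat) : Int) < n)]
    rw [pvStepA h t]
    have hk' : (n - ((((h ++ "A" : String).length : Nat)) : Int)).toNat = k := by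
      have h1 : (("A" : String).length : Nat) = 1 := by decide
      simp only [String.length_append, h1]
      push_cast
      omega
    rw [pvStepA_head h t]
    rw [ih n (h ++ "A") _ hk']
    rw [← pvStepA_head h t]
    exact pvCombos_shift k (h :: t)

theorem pvGenB_eq (n : Int) (h : String) (t : List String) :
    generateExhaustiveOligomerList_alt n (h :: t) =
      (h :: t).flatMap (fun olig => (pvCombos (n - ((h.length : Nat) : Int)).toNat).map (fun s => olig ++ s)) := by
  unfold generateExhaustiveOligomerList_alt
  simp only [if_neg (by simp : ¬(h :: t = ([] : List String))), List.headD_cons]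
  rw [pvSuffixes_eq]

-- On the empty set both programs first substitute the default letters.
theorem pvGenA_nil (n : Int) :
    generateExhaustiveOligomerList n [] = generateExhaustiveOligomerList n ["A", "C", "G", "T"] := by
  conv_lhs => rw [generateExhaustiveOligomerList]
  conv_rhs => rw [generateExhaustiveOligomerList]
  simp

theorem pvGenB_nil (n : Int) :
    generateExhaustiveOligomerList_alt n [] = generateExhaustiveOligomerList_alt n ["A", "C", "G", "T"] := by
  unfold generateExhaustiveOligomerList_alt
  simp

-- ===== VERDICT (by name: the statement is the Claim_ definition above) =====
theorem generateExhaustiveOligomerList_spec : Claim_equal_generateExhaustiveOligomerList := by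
  intro n startingSet _
  unfold Spec_generateExhaustiveOligomerList
  cases startingSet with
  | nil =>
    rw [pvGenA_nil, pvGenB_nil, pvGenA_eq _ n "A" ["C", "G", "T"] rfl, pvGenB_eq]
  | cons h t =>
    rw [pvGenA_eq _ n h t rfl, pvGenB_eq]
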